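-- pv_equiv track=rewrite | github.com/otaviocarva7ho/Trabalho-de-Estrutura-de-Dados-1 | cadeiasPilha(1).py | formaCadeiaCorreta1
-- ===== SOURCE A (Python) =====
-- def formaCadeiaCorreta1(cadeia):
--     qtdc = 0
--     for crt in cadeia:
--         if crt.lower() != 'a' and crt.lower() != 'b' and crt.lower() != 'c':
--             return False
--         if crt.lower() == 'c':
--             qtdc += 1
--
--     if qtdc != 1:
--         return False
--
--     return True
-- ===== SOURCE B (Python) =====
-- def formaCadeiaCorreta1(cadeia):
--     s = cadeia.lower()
--     i = s.find('c')
--     if i < 0: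
--         return False
--     resto = s[:i] + s[i+1:]
--     return all(ch == 'a' or ch == 'b' for ch in resto)
-- ===== Notes on version B (the rewrite author's own statement) =====
-- stated objective: alternative
-- what changed: Instead of a fused scan that counts 'c's while checking the {a,b,c} alphabet, B locates the first 'c' with str.find, deletes it by splicing the two slices around it, and then validates the remainder against the smaller alphabet {a,b} (which simultaneously rules out a second 'c').
import Mathlib
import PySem

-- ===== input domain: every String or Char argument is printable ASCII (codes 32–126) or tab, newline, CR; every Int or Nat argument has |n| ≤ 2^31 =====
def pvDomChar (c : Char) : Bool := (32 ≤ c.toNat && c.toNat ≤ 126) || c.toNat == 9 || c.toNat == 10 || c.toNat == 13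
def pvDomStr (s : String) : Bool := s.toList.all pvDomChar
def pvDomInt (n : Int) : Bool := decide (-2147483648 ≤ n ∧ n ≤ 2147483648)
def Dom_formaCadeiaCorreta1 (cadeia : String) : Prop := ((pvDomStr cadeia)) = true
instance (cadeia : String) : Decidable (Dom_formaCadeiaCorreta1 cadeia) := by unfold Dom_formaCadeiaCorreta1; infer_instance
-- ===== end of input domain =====

-- B locates the first 'c' with find, splices it out, and checks the remainder against {a,b};
-- an alternative decomposition of A's fused counting scan, same O(n) cost.

-- ===== PORT A =====
-- the for-loop with its early 'return False' and the qtdc counter, then the final qtdc != 1 check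
def pvLoopA : List Char → Int → Bool
  | [], qtdc => if qtdc ≠ 1 then false else true
  | crt :: rest, qtdc =>
    if PySem.Chars.lowerChar crt ≠ 'a' ∧ PySem.Chars.lowerChar crt ≠ 'b' ∧ PySem.Chars.lowerChar crt ≠ 'c' then
      false
    else if PySem.Chars.lowerChar crt = 'c' then
      pvLoopA rest (qtdc + 1)
    else
      pvLoopA rest qtdc

def formaCadeiaCorreta1 (cadeia : String) : Bool :=
  pvLoopA cadeia.toList 0

-- ===== PORT B =====
def formaCadeiaCorreta1_alt (cadeia : String) : Bool :=
  let s := (PySem.Str.lower cadeia).toList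
  let i := PySem.Chars.find s ['c']
  if i < 0 then false
  else
    let resto := PySem.Chars.slice s none (some i) ++ PySem.Chars.slice s (some (i + 1)) none
    resto.all (fun ch => ch == 'a' || ch == 'b')

-- ===== PRECONDITION & SPEC =====
def Spec_formaCadeiaCorreta1 (cadeia : String) (out : Bool) : Prop := out = formaCadeiaCorreta1_alt cadeia
instance (cadeia : String) (out : Bool) : Decidable (Spec_formaCadeiaCorreta1 cadeia out) := by unfold Spec_formaCadeiaCorreta1; infer_instance

-- ===== CLAIM (what is proved, stated in full; the proofs are below) =====
def Claim_equal_formaCadeiaCorreta1 : Prop := ∀ (cadeia : String), Dom_formaCadeiaCorreta1 cadeia → Spec_formaCadeiaCorreta1 cadeia (formaCadeiaCorreta1 cadeia)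

-- ===== LEMMAS AND PROOFS =====

-- A's loop, characterised: all chars admissible and qtdc + (number of 'c's) = 1
theorem pvLoopA_eq (l : List Char) : ∀ (q : Int),
    pvLoopA l q =
      ((l.all fun c => PySem.Chars.lowerChar c == 'a' || PySem.Chars.lowerChar c == 'b' || PySem.Chars.lowerChar c == 'c') &&
        decide (q + (l.countP fun c => PySem.Chars.lowerChar c == 'c') = 1)) := by
  induction l with
  | nil =>
    intro q
    simp only [pvLoopA, List.all_nil, Bool.true_and, List.countP_nil, Nat.cast_zero, add_zero]
    split_ifs with h
    · simp [h]
    · simp at h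
      simp [h]
  | cons c t ih =>
    intro q
    by_cases hbad : PySem.Chars.lowerChar c ≠ 'a' ∧ PySem.Chars.lowerChar c ≠ 'b' ∧ PySem.Chars.lowerChar c ≠ 'c'
    · have hfalse : ((c :: t).all fun c => PySem.Chars.lowerChar c == 'a' ||
          PySem.Chars.lowerChar c == 'b' || PySem.Chars.lowerChar c == 'c') = false := by
        rw [List.all_eq_false]
        exact ⟨c, by simp, by simp; tauto⟩
      simp [pvLoopA, hbad, hfalse]
    · by_cases hc : PySem.Chars.lowerChar c = 'c'
      · simp [pvLoopA, hc, ih]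
        congr 1
        rw [Bool.eq_iff_iff]
        simp
        omega
      · have hok : PySem.Chars.lowerChar c = 'a' ∨ PySem.Chars.lowerChar c = 'b' := by tauto
        simp [pvLoopA, hc, ih]
        rcases hok with h | h <;> simp [h]

-- on the lowercased list L, both sides agree
theorem pv_main (L : List Char) :
    ((L.all fun c => c == 'a' || c == 'b' || c == 'c') &&
        decide ((0 : Int) + (L.countP fun c => c == 'c') = 1)) =
      (if PySem.Chars.find L ['c'] < 0 then false
       else (PySem.Chars.slice L none (some (PySem.Chars.find L ['c'])) ++
             PySem.Chars.slice L (some (PySem.Chars.find L ['c'] + 1)) none).all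
               (fun ch => ch == 'a' || ch == 'b')) := by
  by_cases hmem : 'c' ∈ L
  · -- find succeeds
    have hinf : ['c'] <:+: L := by
      obtain ⟨l1, l2, h⟩ := List.append_of_mem hmem
      exact ⟨l1, l2, by simp [h]⟩
    have hpos : 0 ≤ PySem.Chars.find L ['c'] := (PySem.Chars.find_nonneg_iff L ['c']).2 hinf
    have hneg : ¬ PySem.Chars.find L ['c'] < 0 := by omega
    obtain ⟨hpre, hmin⟩ := PySem.Chars.find_spec hpos
    set n := (PySem.Chars.find L ['c']).toNat with hn
    have hfind : PySem.Chars.find L ['c'] = (n : Int) := by omega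
    have hlt : n < L.length := by
      by_contra h
      simp [List.drop_eq_nil_of_le (le_of_not_gt h)] at hpre
    have hgetn : L[n] = 'c' := by
      obtain ⟨t, ht⟩ := hpre
      rw [List.drop_eq_getElem_cons hlt, List.singleton_append] at ht
      injection ht with h1 h2
      exact h1.symm
    have hdrop : L.drop n = 'c' :: L.drop (n + 1) := by
      rw [List.drop_eq_getElem_cons hlt, hgetn]
    have htake : ∀ x ∈ L.take n, x ≠ 'c' := by
      intro x hx hc
      obtain ⟨j, hj, hget⟩ := List.mem_iff_getElem.1 hx
      have hjlen : j < L.length := by simp [List.length_take] at hj; omega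
      have hjn : j < n := by simp [List.length_take] at hj; omega
      apply hmin j hjn
      have : L.drop j = L[j] :: L.drop (j+1) := List.drop_eq_getElem_cons hjlen
      rw [this]
      have : L[j] = x := by
        rw [← hget]; simp [List.getElem_take]
      exact ⟨L.drop (j+1), by simp [this, hc]⟩
    have hsplit : L = L.take n ++ 'c' :: L.drop (n + 1) := by
      conv_lhs => rw [← List.take_append_drop n L]
      rw [hdrop]
    rw [if_neg hneg, hfind]
    simp only [PySem.Chars.slice_eq_listSlice]
    rw [PySem.List.slice_to_natCast]
    have : ((n : Int) + 1) = ((n + 1 : Nat) : Int) := by push_cast; ring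
    rw [this, PySem.List.slice_from_natCast]
    conv_lhs => rw [hsplit]
    simp only [List.all_append, List.countP_append, List.all_cons, List.countP_cons]
    have hcntTake : (L.take n).countP (fun c => c == 'c') = 0 := by
      rw [List.countP_eq_zero]
      intro x hx
      simpa using htake x hx
    rw [hcntTake]
    simp only [beq_self_eq_true, if_pos, Bool.true_and, Bool.or_true]
    rw [Bool.eq_iff_iff]
    simp only [Bool.and_eq_true, List.all_eq_true, decide_eq_true_iff]
    constructor
    · rintro ⟨⟨h1, h2⟩, hcnt⟩
      have hrest : (L.drop (n+1)).countP (fun c => c == 'c') = 0 := by omega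
      rw [List.countP_eq_zero] at hrest
      refine ⟨fun x hx => ?_, fun x hx => ?_⟩
      · have := h1 x hx; have hne := htake x hx
        simp at this ⊢; rcases this with h|h|h <;> tauto
      · have := h2 x hx; have hne := hrest x hx
        simp at this hne ⊢; rcases this with h|h|h <;> tauto
    · rintro ⟨h1, h2⟩
      refine ⟨⟨fun x hx => ?_, fun x hx => ?_⟩, ?_⟩
      · have := h1 x hx; simp at this ⊢; tauto
      · have := h2 x hx; simp at this ⊢; tauto
      · have hrest : (L.drop (n+1)).countP (fun c => c == 'c') = 0 := by
          rw [List.countP_eq_zero]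
          intro x hx
          have := h2 x hx; simp at this ⊢
          rcases this with h|h <;> simp [h]
        omega
  · -- find fails
    have hninf : ¬ ['c'] <:+: L := by
      intro ⟨l1, l2, h⟩
      exact hmem (by rw [← h]; simp)
    have : PySem.Chars.find L ['c'] = -1 := (PySem.Chars.find_eq_neg_one_iff L ['c']).2 hninf
    rw [this, if_pos (by norm_num)]
    have hcnt : (L.countP fun c => c == 'c') = 0 := by
      rw [List.countP_eq_zero]
      intro x hx
      simp
      rintro rfl; exact hmem hx
    simp [hcnt]

-- ===== VERDICT (by name: the statement is the Claim_ definition above) =====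
theorem formaCadeiaCorreta1_spec : Claim_equal_formaCadeiaCorreta1 := by
  intro cadeia _
  unfold Spec_formaCadeiaCorreta1 formaCadeiaCorreta1 formaCadeiaCorreta1_alt
  rw [pvLoopA_eq]
  simp only [PySem.Str.toList_lower]
  rw [show PySem.Chars.lower cadeia.toList = cadeia.toList.map PySem.Chars.lowerChar from rfl]
  have h := pv_main (cadeia.toList.map PySem.Chars.lowerChar)
  simp only [List.all_map, List.countP_map, Function.comp_def] at h
  exact h
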